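-- pv_equiv track=rewrite | github.com/alexdelorenzo/advent_of_code | day_11.py | replace_all_after_bad
-- ===== SOURCE A (Python) =====
-- BAD = {'i', 'o', 'l'}
--
-- def contains_bad(input: str) -> bool:
--     for bad in BAD:
--         if bad in input:
--             return True
--
--     return False
--
-- def replace_all_after_bad(input: str) -> str:
--     # input = abciaaaa
--     # output = abcjaaaa
--
--     length = len(input)
--
--     if contains_bad(input):
--         for bad in BAD:
--             index = input.find(bad)
--
--             if index > -1:
--                 inc_chr = chr(ord(input[index]) + 1)
--                 filler = 'a' * (length - index - 1)
--                 input = input[:index] + inc_chr + filler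
--
--     return input
-- ===== SOURCE B (Python) =====
-- BAD = {'i', 'o', 'l'}
--
-- def replace_all_after_bad(input: str) -> str:
--     for i, c in enumerate(input):
--         if c in BAD:
--             return input[:i] + chr(ord(c) + 1) + 'a' * (len(input) - i - 1)
--     return input
-- ===== Notes on version B (the rewrite author's own statement) =====
-- stated objective: simpler
-- what changed: A pre-checks with contains_bad and then loops over the 3-element BAD set, re-scanning and rewriting the mutated string with find for each bad letter; B makes a single left-to-right pass over the characters and rewrites the string once at the first bad character (or returns it unchanged).
import Mathlib
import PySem

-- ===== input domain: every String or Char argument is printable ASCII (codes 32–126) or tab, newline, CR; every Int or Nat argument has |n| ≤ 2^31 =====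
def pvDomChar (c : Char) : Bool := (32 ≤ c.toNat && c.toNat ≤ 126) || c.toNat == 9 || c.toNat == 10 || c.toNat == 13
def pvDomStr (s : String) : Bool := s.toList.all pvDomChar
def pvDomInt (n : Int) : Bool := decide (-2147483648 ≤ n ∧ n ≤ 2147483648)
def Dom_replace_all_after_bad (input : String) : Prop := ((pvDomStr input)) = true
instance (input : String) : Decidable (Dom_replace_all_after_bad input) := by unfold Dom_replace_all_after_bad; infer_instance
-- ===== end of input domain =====

-- B replaces A's contains_bad pre-check plus a loop over the BAD set with repeated find/rebuild
-- of the mutated string by one left-to-right scan that rewrites the string once at the first bad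
-- character (objective: simpler).

-- ===== PORT A =====
-- module constant BAD = {'i', 'o', 'l'} (a Python set)
def pvBAD : PySem.Set Char := PySem.Set.ofList ['i', 'o', 'l']

-- `for bad in BAD: if bad in input: return True` then `return False`
def contains_bad_go : List Char → List Char → Bool
  | [], _ => false
  | b :: rest, s => if PySem.Chars.isIn [b] s then true else contains_bad_go rest s

def contains_bad (input : String) : Bool := contains_bad_go pvBAD input.toList

-- the `for bad in BAD` loop of replace_all_after_bad, mutating the string s
def replace_loop (length : Int) : List Char → List Char → List Char
  | [], s => s
  | b :: rest, s =>
    let index := PySem.Chars.find s [b]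
    if index > -1 then
      match PySem.List.pyGet? s index with  -- input[index]; find returned a valid index, so never none
      | some c =>
          replace_loop length rest
            (PySem.List.slice s none (some index) ++
              [Char.ofNat (c.toNat + 1)] ++ List.replicate (length - index - 1).toNat 'a')
      | none => replace_loop length rest s
    else replace_loop length rest s

def replace_all_after_bad (input : String) : String :=
  let length := PySem.Str.len input
  if contains_bad input then String.ofList (replace_loop length pvBAD input.toList)
  else input

-- ===== PORT B =====
-- `for i, c in enumerate(input)` with an early return at the first bad character
def alt_go (full : List Char) : Nat → List Char → Option (List Char)
  | _, [] => none
  | i, c :: rest =>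
    if pvBAD.contains c then
      some (PySem.List.slice full none (some (i : Int)) ++
            Char.ofNat (c.toNat + 1) :: List.replicate (full.length - i - 1) 'a')
    else alt_go full (i + 1) rest

def replace_all_after_bad_alt (input : String) : String :=
  match alt_go input.toList 0 input.toList with
  | some r => String.ofList r
  | none => input

-- ===== PRECONDITION & SPEC =====
def Spec_replace_all_after_bad (input : String) (out : String) : Prop := out = replace_all_after_bad_alt input
instance (input : String) (out : String) : Decidable (Spec_replace_all_after_bad input out) := by unfold Spec_replace_all_after_bad; infer_instance

-- ===== CLAIM (what is proved, stated in full; the proofs are below) =====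
def Claim_equal_replace_all_after_bad : Prop := ∀ (input : String), Dom_replace_all_after_bad input → Spec_replace_all_after_bad input (replace_all_after_bad input)

-- ===== LEMMAS AND PROOFS =====

def pvBadL : List Char := ['i', 'o', 'l']

lemma pvBAD_eq : pvBAD = pvBadL := by decide

lemma prefix_singleton_iff (b : Char) (l : List Char) : [b] <+: l ↔ l[0]? = some b := by
  cases l with
  | nil => simp
  | cons c cs => simp [List.cons_prefix_cons, eq_comm]

lemma infix_singleton_iff (b : Char) (l : List Char) : [b] <:+: l ↔ b ∈ l := by
  constructor
  · intro h; exact List.singleton_sublist.mp h.sublist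
  · intro h
    obtain ⟨q, r, hqr⟩ := List.append_of_mem h
    exact ⟨q, r, by rw [hqr]; simp⟩

lemma find_singleton_neg (b : Char) (s : List Char) (h : b ∉ s) :
    PySem.Chars.find s [b] = -1 := by
  rw [PySem.Chars.find_eq_neg_one_iff]
  intro hc
  exact h ((infix_singleton_iff b s).mp hc)

lemma find_first (p t : List Char) (b : Char) (hb : b ∉ p) :
    PySem.Chars.find (p ++ b :: t) [b] = (p.length : Int) := by
  have hmem : b ∈ p ++ b :: t := by simp
  have h0 : 0 ≤ PySem.Chars.find (p ++ b :: t) [b] := by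
    rw [PySem.Chars.find_nonneg_iff]
    exact (infix_singleton_iff _ _).mpr hmem
  obtain ⟨hpre, hmin⟩ := PySem.Chars.find_spec h0
  set k := (PySem.Chars.find (p ++ b :: t) [b]).toNat with hk
  have hsp : ∀ i : Nat, [b] <+: (p ++ b :: t).drop i ↔ (p ++ b :: t)[i]? = some b := by
    intro i
    rw [prefix_singleton_iff]
    simp [List.getElem?_drop]
  have hat : (p ++ b :: t)[p.length]? = some b := by
    simp
  have hlt : ∀ i, i < p.length → (p ++ b :: t)[i]? ≠ some b := by
    intro i hi hcon
    rw [List.getElem?_append_left hi] at hcon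
    exact hb (List.mem_of_getElem? hcon)
  have hkp : k = p.length := by
    rcases lt_trichotomy k p.length with h | h | h
    · exact absurd ((hsp k).mp hpre) (hlt k h)
    · exact h
    · exact absurd ((hsp p.length).mpr hat) (hmin p.length h)
  rw [← Int.toNat_of_nonneg h0, ← hk, hkp]

lemma first_split (b : Char) (l : List Char) (h : b ∈ l) :
    ∃ q r, l = q ++ b :: r ∧ b ∉ q := by
  induction l with
  | nil => cases h
  | cons c cs ih =>
    by_cases hc : c = b
    · subst hc; exact ⟨[], cs, rfl, by simp⟩
    · have hbcs : b ∈ cs := by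
        rcases List.mem_cons.mp h with h1 | h1
        · exact absurd h1.symm hc
        · exact h1
      obtain ⟨q, r, hqr, hq⟩ := ih hbcs
      refine ⟨c :: q, r, by rw [hqr]; rfl, ?_⟩
      intro hm
      rcases List.mem_cons.mp hm with h1 | h1
      · exact hc h1.symm
      · exact hq h1

lemma first_bad_split (l : List Char) (h : ∃ c ∈ l, c ∈ pvBadL) :
    ∃ p b t, l = p ++ b :: t ∧ b ∈ pvBadL ∧ ∀ c ∈ p, c ∉ pvBadL := by
  induction l with
  | nil => obtain ⟨c, hc, _⟩ := h; cases hc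
  | cons c cs ih =>
    by_cases hc : c ∈ pvBadL
    · exact ⟨[], c, cs, rfl, hc, by simp⟩
    · have h' : ∃ x ∈ cs, x ∈ pvBadL := by
        obtain ⟨x, hx, hxb⟩ := h
        rcases List.mem_cons.mp hx with h1 | h1
        · exact absurd (h1 ▸ hxb) hc
        · exact ⟨x, h1, hxb⟩
      obtain ⟨p, b, t, hpt, hb, hp⟩ := ih h'
      refine ⟨c :: p, b, t, by rw [hpt]; rfl, hb, ?_⟩
      intro x hx
      rcases List.mem_cons.mp hx with h1 | h1
      · exact h1 ▸ hc
      · exact hp x h1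

lemma inc_not_bad (b : Char) (hb : b ∈ pvBadL) : Char.ofNat (b.toNat + 1) ∉ pvBadL := by
  fin_cases hb <;> decide

lemma loop_id (L : Int) (bs : List Char) : ∀ (s : List Char), (∀ c ∈ s, c ∉ pvBadL) →
    (∀ b ∈ bs, b ∈ pvBadL) → replace_loop L bs s = s := by
  induction bs with
  | nil => intro s _ _; rfl
  | cons b rest ih =>
    intro s hs hbs
    have hbn : b ∉ s := fun hmem => hs b hmem (hbs b (List.mem_cons_self ..))
    simp only [replace_loop, find_singleton_neg b s hbn]
    norm_num
    exact ih s hs (fun x hx => hbs x (List.mem_cons_of_mem _ hx))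

lemma loop_spec (bs : List Char) : ∀ (p t : List Char) (b0 : Char) (L : Int),
    (∀ b ∈ bs, b ∈ pvBadL) → (∀ c ∈ p, c ∉ pvBadL) → b0 ∈ pvBadL → b0 ∈ bs →
    L = (p.length : Int) + 1 + t.length →
    replace_loop L bs (p ++ b0 :: t) =
      p ++ Char.ofNat (b0.toNat + 1) :: List.replicate t.length 'a' := by
  induction bs with
  | nil => intro p t b0 L _ _ _ hb0bs _; cases hb0bs
  | cons b rest ih =>
    intro p t b0 L hbs hp hb0 hb0bs hL
    have hbbad : b ∈ pvBadL := hbs b (List.mem_cons_self ..)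
    by_cases hbb : b = b0
    · subst hbb
      have hbp : b ∉ p := fun hmem => hp b hmem hbbad
      simp only [replace_loop, find_first p t b hbp]
      rw [if_pos (by omega : (p.length : Int) > -1)]
      have hget : PySem.List.pyGet? (p ++ b :: t) ((p.length : Nat) : Int) = some b := by
        rw [PySem.List.pyGet?_natCast]
        simp
      simp only [hget]
      rw [PySem.List.slice_to_natCast]
      have hrep : (L - (p.length : Int) - 1).toNat = t.length := by omega
      rw [hrep, List.take_left]
      rw [show p ++ [Char.ofNat (b.toNat + 1)] ++ List.replicate t.length 'a'
          = p ++ Char.ofNat (b.toNat + 1) :: List.replicate t.length 'a' from by simp]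
      apply loop_id
      · intro c hc
        rcases List.mem_append.mp hc with h1 | h1
        · exact hp c h1
        · rcases List.mem_cons.mp h1 with h2 | h2
          · exact h2 ▸ inc_not_bad b hbbad
          · rw [List.eq_of_mem_replicate h2]; decide
      · intro x hx; exact hbs x (List.mem_cons_of_mem _ hx)
    · have hb0rest : b0 ∈ rest := by
        rcases List.mem_cons.mp hb0bs with h | h
        · exact absurd h.symm hbb
        · exact h
      by_cases hbmem : b ∈ p ++ b0 :: t
      · have hbp : b ∉ p := fun hm => hp b hm hbbad
        have hbt : b ∈ t := by
          rcases List.mem_append.mp hbmem with h | h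
          · exact absurd h hbp
          · rcases List.mem_cons.mp h with h1 | h1
            · exact absurd h1 hbb
            · exact h1
        obtain ⟨t1, t2, ht, ht1⟩ := first_split b t hbt
        have hq : b ∉ p ++ b0 :: t1 := by
          intro hm
          rcases List.mem_append.mp hm with h | h
          · exact hbp h
          · rcases List.mem_cons.mp h with h1 | h1
            · exact hbb h1
            · exact ht1 h1
        have hre : p ++ b0 :: t = (p ++ b0 :: t1) ++ b :: t2 := by rw [ht]; simp
        rw [hre]
        simp only [replace_loop, find_first (p ++ b0 :: t1) t2 b hq]
        rw [if_pos (by omega : ((p ++ b0 :: t1).length : Int) > -1)]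
        have hget : PySem.List.pyGet? ((p ++ b0 :: t1) ++ b :: t2)
            (((p ++ b0 :: t1).length : Nat) : Int) = some b := by
          rw [PySem.List.pyGet?_natCast]
          simp
        simp only [hget]
        rw [PySem.List.slice_to_natCast]
        have hlt : t.length = t1.length + 1 + t2.length := by rw [ht]; simp; omega
        have hrep : (L - ((p ++ b0 :: t1).length : Int) - 1).toNat = t2.length := by
          simp only [List.length_append, List.length_cons]
          omega
        rw [hrep, List.take_left]
        rw [show (p ++ b0 :: t1) ++ [Char.ofNat (b.toNat + 1)] ++ List.replicate t2.length 'a'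
            = p ++ b0 :: (t1 ++ Char.ofNat (b.toNat + 1) :: List.replicate t2.length 'a')
            from by simp]
        rw [ih p (t1 ++ Char.ofNat (b.toNat + 1) :: List.replicate t2.length 'a') b0 L
          (fun x hx => hbs x (List.mem_cons_of_mem _ hx)) hp hb0 hb0rest
          (by simp only [List.length_append, List.length_cons, List.length_replicate]; omega)]
        rw [show (t1 ++ Char.ofNat (b.toNat + 1) :: List.replicate t2.length 'a').length
            = t.length from by
          simp only [List.length_append, List.length_cons, List.length_replicate]; omega]
      · simp only [replace_loop, find_singleton_neg b _ hbmem]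
        norm_num
        exact ih p t b0 L (fun x hx => hbs x (List.mem_cons_of_mem _ hx)) hp hb0 hb0rest hL

lemma cbgo_true (bs s : List Char) (h : ∃ b ∈ bs, b ∈ s) : contains_bad_go bs s = true := by
  induction bs with
  | nil => obtain ⟨b, hb, _⟩ := h; cases hb
  | cons b rest ih =>
    by_cases hbs : b ∈ s
    · have hb : PySem.Chars.isIn [b] s = true :=
        (PySem.Chars.isIn_iff_infix _ _).mpr ((infix_singleton_iff b s).mpr hbs)
      simp [contains_bad_go, hb]
    · obtain ⟨x, hx, hxs⟩ := h
      have hxr : x ∈ rest := by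
        rcases List.mem_cons.mp hx with h1 | h1
        · exact absurd (h1 ▸ hxs) hbs
        · exact h1
      simp only [contains_bad_go]
      split
      · rfl
      · exact ih ⟨x, hxr, hxs⟩

lemma cbgo_false (bs s : List Char) (h : ∀ b ∈ bs, b ∉ s) : contains_bad_go bs s = false := by
  induction bs with
  | nil => rfl
  | cons b rest ih =>
    have hb : PySem.Chars.isIn [b] s = false := by
      rw [PySem.Chars.isIn_eq_false_iff]
      intro hc
      exact h b (List.mem_cons_self ..) ((infix_singleton_iff b s).mp hc)
    simp only [contains_bad_go, hb]
    norm_num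
    exact ih (fun x hx => h x (List.mem_cons_of_mem _ hx))

lemma alt_none (full : List Char) : ∀ (rest : List Char) (i : Nat),
    (∀ c ∈ rest, c ∉ pvBadL) → alt_go full i rest = none := by
  intro rest
  induction rest with
  | nil => intro i _; rfl
  | cons c cs ih =>
    intro i h
    have hc : pvBAD.contains c = false := by
      rw [pvBAD_eq]
      simpa using h c (List.mem_cons_self ..)
    simp only [alt_go, hc]
    norm_num
    exact ih (i + 1) (fun x hx => h x (List.mem_cons_of_mem _ hx))

lemma alt_spec (full : List Char) : ∀ (p : List Char) (t : List Char) (b0 : Char) (i : Nat),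
    (∀ c ∈ p, c ∉ pvBadL) → b0 ∈ pvBadL → full.length = i + p.length + 1 + t.length →
    alt_go full i (p ++ b0 :: t) =
      some (List.take (i + p.length) full ++
        Char.ofNat (b0.toNat + 1) :: List.replicate t.length 'a') := by
  intro p
  induction p with
  | nil =>
    intro t b0 i _ hb0 hlen
    have hc : pvBAD.contains b0 = true := by
      rw [pvBAD_eq]; simpa using hb0
    simp only [List.nil_append, alt_go, hc, if_pos]
    rw [PySem.List.slice_to_natCast]
    have hrep : full.length - i - 1 = t.length := by
      simp only [List.length_nil] at hlen; omega
    rw [hrep]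
    norm_num
  | cons c p ih =>
    intro t b0 i hp hb0 hlen
    have hc : pvBAD.contains c = false := by
      rw [pvBAD_eq]
      simpa using hp c (List.mem_cons_self ..)
    rw [List.cons_append]
    rw [show alt_go full i (c :: (p ++ b0 :: t)) = alt_go full (i + 1) (p ++ b0 :: t) from by
      simp only [alt_go, hc]
      norm_num]
    rw [ih t b0 (i + 1) (fun x hx => hp x (List.mem_cons_of_mem _ hx)) hb0
      (by simp only [List.length_cons] at hlen ⊢; omega)]
    have harith : i + (c :: p).length = i + 1 + p.length := by
      simp only [List.length_cons]; omega
    rw [harith]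

-- ===== VERDICT (by name: the statement is the Claim_ definition above) =====
theorem replace_all_after_bad_spec : Claim_equal_replace_all_after_bad := by
  intro input _
  unfold Spec_replace_all_after_bad
  by_cases hbad : ∃ c ∈ input.toList, c ∈ pvBadL
  · obtain ⟨p, b0, t, hs, hb0, hp⟩ := first_bad_split input.toList hbad
    have hcb : contains_bad input = true := by
      refine cbgo_true _ _ ⟨b0, ?_, ?_⟩
      · rw [pvBAD_eq]; exact hb0
      · rw [hs]; simp
    have hlen : PySem.Str.len input = (p.length : Int) + 1 + t.length := by
      rw [PySem.Str.len_eq, hs]; simp; ring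
    have hA : replace_all_after_bad input =
        String.ofList (p ++ Char.ofNat (b0.toNat + 1) :: List.replicate t.length 'a') := by
      simp only [replace_all_after_bad, hcb, if_true]
      rw [hs, hlen, loop_spec]
      · rw [pvBAD_eq]; intro b hb; exact hb
      · exact hp
      · exact hb0
      · rw [pvBAD_eq]; exact hb0
      · rfl
    have hB : replace_all_after_bad_alt input =
        String.ofList (p ++ Char.ofNat (b0.toNat + 1) :: List.replicate t.length 'a') := by
      unfold replace_all_after_bad_alt
      have halt := alt_spec input.toList p t b0 0 hp hb0
        (by rw [hs]; simp only [List.length_append, List.length_cons]; omega)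
      rw [hs] at halt ⊢
      rw [halt]
      simp
    rw [hA, hB]
  · have hbad' : ∀ c ∈ input.toList, c ∉ pvBadL := fun c hc hb => hbad ⟨c, hc, hb⟩
    have hcb : contains_bad input = false := by
      refine cbgo_false _ _ ?_
      intro b hbB hbs
      exact hbad' b hbs (by rw [pvBAD_eq] at hbB; exact hbB)
    have hA : replace_all_after_bad input = input := by
      simp [replace_all_after_bad, hcb]
    have hB : replace_all_after_bad_alt input = input := by
      unfold replace_all_after_bad_alt
      rw [alt_none _ _ 0 hbad']
    rw [hA, hB]
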